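-- pv_equiv track=rewrite | github.com/maciejGolebio/SPD | witi/WiTi.py | goalFunction
-- ===== SOURCE A (Python) =====
-- def goalFunction(data):
--     # zadania
--     C, F, T = [], [], []
--     time = 0
--     for d in data:
--         time += d[0]
--         C.append(time)
--     F_best = 0
--     for i in range(0, len(C)):
--         if C[i] > data[i][2]:
--             T.append(C[i] - data[i][2])
--         else:
--             T.append(0)
--         F.append(T[i] * data[i][1])
--         F_best += F[i]
--     return F_best
-- ===== SOURCE B (Python) =====
-- def goalFunction(data):
--     time = 0
--     best = 0
--     for d in data:
--         time += d[0]
--         if time > d[2]: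
--             best += (time - d[2]) * d[1]
--     return best
-- ===== Notes on version B (the rewrite author's own statement) =====
-- stated objective: simpler
-- what changed: Replaced the two sequential loops and the three intermediate lists C/T/F by a single fused pass that keeps only a running completion time and a running weighted-tardiness sum.
import Mathlib
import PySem

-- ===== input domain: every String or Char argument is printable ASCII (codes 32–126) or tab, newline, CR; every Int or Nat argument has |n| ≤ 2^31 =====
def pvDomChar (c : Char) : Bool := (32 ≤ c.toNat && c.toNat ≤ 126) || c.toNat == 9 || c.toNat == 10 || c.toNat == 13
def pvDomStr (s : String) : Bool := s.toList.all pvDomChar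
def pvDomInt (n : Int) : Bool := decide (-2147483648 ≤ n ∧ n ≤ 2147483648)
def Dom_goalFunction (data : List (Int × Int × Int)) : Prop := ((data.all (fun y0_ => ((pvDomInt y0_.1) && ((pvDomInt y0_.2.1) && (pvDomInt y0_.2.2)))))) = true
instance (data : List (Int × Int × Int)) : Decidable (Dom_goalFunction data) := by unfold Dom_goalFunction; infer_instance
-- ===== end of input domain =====

-- B fuses A's two loops and three intermediate lists into one pass keeping a running time and sum (simpler, O(1) extra space).


-- ===== PORT A =====
-- First loop: build C (completion times).  Second loop: indexed over range(len(C)),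
-- building T and F and summing F_best.  Indices produced by the range are always in
-- bounds, so `getD` with a default is exact here (Python never raises in this loop).
def goalFunction (data : List (Int × Int × Int)) : Int :=
  let s := data.foldl (fun (p : List Int × Int) d =>
    let t := p.2 + d.1
    (p.1 ++ [t], t)) (([] : List Int), 0)
  let C := s.1
  let s2 := (List.range C.length).foldl (fun (q : List Int × List Int × Int) i =>
      let Ti := if C.getD i 0 > (data.getD i (0,0,0)).2.2
                then C.getD i 0 - (data.getD i (0,0,0)).2.2 else 0
      let T := q.1 ++ [Ti]
      let Fi := T.getD i 0 * (data.getD i (0,0,0)).2.1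
      (T, q.2.1 ++ [Fi], q.2.2 + Fi)) (([] : List Int), ([] : List Int), (0 : Int))
  s2.2.2

-- ===== PORT B =====
def goalFunction_alt (data : List (Int × Int × Int)) : Int :=
  (data.foldl (fun (p : Int × Int) d =>
    let t := p.1 + d.1
    (t, if t > d.2.2 then p.2 + (t - d.2.2) * d.2.1 else p.2)) ((0 : Int), (0 : Int))).2

-- ===== PRECONDITION & SPEC =====
def Spec_goalFunction (data : List (Int × Int × Int)) (out : Int) : Prop := out = goalFunction_alt data
instance (data : List (Int × Int × Int)) (out : Int) : Decidable (Spec_goalFunction data out) := by unfold Spec_goalFunction; infer_instance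

-- ===== CLAIM (what is proved, stated in full; the proofs are below) =====
def Claim_equal_goalFunction : Prop := ∀ (data : List (Int × Int × Int)), Dom_goalFunction data → Spec_goalFunction data (goalFunction data)

-- ===== LEMMAS AND PROOFS =====

-- completion times of `data` starting from time `t`
def pvScanC (t : Int) : List (Int × Int × Int) → List Int
  | [] => []
  | d :: ds => (t + d.1) :: pvScanC (t + d.1) ds

theorem pvScanC_length (t : Int) (data : List (Int × Int × Int)) :
    (pvScanC t data).length = data.length := by
  induction data generalizing t with
  | nil => rfl
  | cons d ds ih => simp [pvScanC, ih]

theorem pvFold1 (data : List (Int × Int × Int)) : ∀ (acc : List Int) (t : Int),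
    (data.foldl (fun (p : List Int × Int) d => (p.1 ++ [p.2 + d.1], p.2 + d.1)) (acc, t)).1
      = acc ++ pvScanC t data := by
  induction data with
  | nil => intro acc t; simp [pvScanC]
  | cons d ds ih => intro acc t; simp [List.foldl, pvScanC, ih]

-- the per-index tardiness cost read off C and data
def pvF (C : List Int) (data : List (Int × Int × Int)) (i : Nat) : Int :=
  (if C.getD i 0 > (data.getD i (0,0,0)).2.2
   then C.getD i 0 - (data.getD i (0,0,0)).2.2 else 0) * (data.getD i (0,0,0)).2.1

theorem pvFold2 (C : List Int) (data : List (Int × Int × Int)) : ∀ (n : Nat),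
    ((List.range n).foldl (fun (q : List Int × List Int × Int) i =>
      let Ti := if C.getD i 0 > (data.getD i (0,0,0)).2.2
                then C.getD i 0 - (data.getD i (0,0,0)).2.2 else 0
      let T := q.1 ++ [Ti]
      let Fi := T.getD i 0 * (data.getD i (0,0,0)).2.1
      (T, q.2.1 ++ [Fi], q.2.2 + Fi)) (([] : List Int), ([] : List Int), (0 : Int)))
    = ((List.range n).map (fun i =>
          if C.getD i 0 > (data.getD i (0,0,0)).2.2
          then C.getD i 0 - (data.getD i (0,0,0)).2.2 else 0),
       (List.range n).map (pvF C data),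
       ((List.range n).map (pvF C data)).sum) := by
  intro n
  induction n with
  | zero => rfl
  | succ n ih =>
    rw [List.range_succ]
    simp only [List.foldl_append, List.foldl_cons, List.foldl_nil, ih]
    have hlen : ((List.range n).map (fun i =>
        if C.getD i 0 > (data.getD i (0,0,0)).2.2
        then C.getD i 0 - (data.getD i (0,0,0)).2.2 else 0)).length = n := by simp
    have hget : ∀ (l : List Int) (x : Int), l.length = n → (l ++ [x]).getD n 0 = x := by
      intro l x h
      simp [List.getD, ← h, List.getElem?_concat_length]
    simp [hget _ _ hlen, pvF, List.map_append]
  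
-- B's fold, with explicit accumulators
theorem pvFoldB (data : List (Int × Int × Int)) : ∀ (t b : Int),
    (data.foldl (fun (p : Int × Int) d =>
      (p.1 + d.1, if p.1 + d.1 > d.2.2 then p.2 + (p.1 + d.1 - d.2.2) * d.2.1 else p.2)) (t, b)).2
    = b + ((List.range data.length).map (pvF (pvScanC t data) data)).sum := by
  induction data with
  | nil => intro t b; simp
  | cons d ds ih =>
    intro t b
    simp only [List.foldl_cons, ih, List.length_cons, List.range_succ_eq_map,
      List.map_cons, List.map_map, List.sum_cons]
    have h0 : pvF (pvScanC t (d :: ds)) (d :: ds) 0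
        = (if t + d.1 > d.2.2 then t + d.1 - d.2.2 else 0) * d.2.1 := by
      simp [pvF, pvScanC, List.getD]
    have hs : ∀ i : Nat, (pvF (pvScanC t (d :: ds)) (d :: ds) ∘ Nat.succ) i
        = pvF (pvScanC (t + d.1) ds) ds i := by
      intro i; simp [pvF, pvScanC, List.getD]
    rw [h0, List.map_congr_left (fun i _ => hs i)]
    by_cases hc : t + d.1 > d.2.2
    · simp [hc]; ring
    · simp [hc]

-- ===== VERDICT (by name: the statement is the Claim_ definition above) =====
theorem goalFunction_spec : Claim_equal_goalFunction := by
  intro data _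
  show goalFunction data = goalFunction_alt data
  unfold goalFunction goalFunction_alt
  simp only []
  rw [show (fun (p : List Int × Int) d => let t := p.2 + d.1; (p.1 ++ [t], t))
        = (fun (p : List Int × Int) (d : Int × Int × Int) => (p.1 ++ [p.2 + d.1], p.2 + d.1)) from rfl]
  rw [pvFold1 data [] 0]
  simp only [List.nil_append]
  rw [pvFold2 (pvScanC 0 data) data, pvScanC_length]
  rw [show (fun (p : Int × Int) (d : Int × Int × Int) =>
        let t := p.1 + d.1; (t, if t > d.2.2 then p.2 + (t - d.2.2) * d.2.1 else p.2))
      = (fun (p : Int × Int) (d : Int × Int × Int) =>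
        (p.1 + d.1, if p.1 + d.1 > d.2.2 then p.2 + (p.1 + d.1 - d.2.2) * d.2.1 else p.2)) from rfl]
  rw [pvFoldB data 0 0]
  simp
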